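-- pv_equiv track=rewrite | github.com/Znimator/Travkin | Labs/12/Solution 2.py | books_in_stores
-- ===== SOURCE A (Python) =====
-- def books_in_stores(books, stores):
--     book_to_stores = {}
--     all_books = set()
--
--     for store_index, store_books in enumerate(stores):
--         for book in store_books:
--             book_to_stores.setdefault(book, []).append(store_index)
--             all_books.add(book)
--
--     in_which_stores = {book: book_to_stores.get(book, []) for book in books}
--
--     not_in_any_store = set(books) - all_books
--
--     return in_which_stores, not_in_any_store, all_books
-- ===== SOURCE B (Python) =====
-- def books_in_stores(books, stores):
--     # Flatten the stock into one list of (book, store_index) placements,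
--     # then answer each query by filtering that list.
--     placements = [(book, i) for i, store in enumerate(stores) for book in store]
--     in_which_stores = {b: [i for book, i in placements if book == b] for b in books}
--     all_books = {book for book, _ in placements}
--     not_in_any_store = set(books) - all_books
--     return in_which_stores, not_in_any_store, all_books
-- ===== Notes on version B (the rewrite author's own statement) =====
-- stated objective: alternative
-- what changed: Replaces A's incrementally built inverted index (setdefault/append dict maintained while scanning stores) by a flat list of (book, store_index) placements built once and filtered per queried book; all_books is a set comprehension over that list.
import Mathlib
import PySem

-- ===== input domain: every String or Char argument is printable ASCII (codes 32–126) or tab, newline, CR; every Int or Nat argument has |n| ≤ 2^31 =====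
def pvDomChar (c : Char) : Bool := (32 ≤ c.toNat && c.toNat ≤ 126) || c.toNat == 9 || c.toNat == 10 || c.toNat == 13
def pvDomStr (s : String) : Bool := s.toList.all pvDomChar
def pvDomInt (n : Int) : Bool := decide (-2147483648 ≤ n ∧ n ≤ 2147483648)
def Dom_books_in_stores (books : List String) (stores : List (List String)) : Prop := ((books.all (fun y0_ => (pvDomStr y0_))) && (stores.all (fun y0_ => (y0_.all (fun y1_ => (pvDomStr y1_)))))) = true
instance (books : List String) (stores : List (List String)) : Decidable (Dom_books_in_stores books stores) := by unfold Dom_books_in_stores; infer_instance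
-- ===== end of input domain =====

-- B replaces A's incrementally built inverted index by a flat (book, store_index)
-- placements list filtered per queried book (alternative decomposition, same results).

-- ===== PORT A =====
-- literal port of A: one pass over enumerate(stores) maintaining the pair
-- (book_to_stores, all_books); setdefault(book, []).append(i) = Dict.modify book [] (· ++ [i])
def books_in_stores (books : List String) (stores : List (List String)) :
    (List (String × List Int)) × List String × List String :=
  let st := (PySem.List.enumerate stores).foldl
    (fun (acc : PySem.Dict String (List Int) × PySem.Set String) p =>
      p.2.foldl (fun acc book =>
        (acc.1.modify book [] (fun l => l ++ [p.1]), PySem.Set.add acc.2 book)) acc)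
    (PySem.Dict.empty, PySem.Set.empty)
  let in_which_stores := books.foldl
    (fun d book => d.insert book (st.1.getD book [])) PySem.Dict.empty
  (in_which_stores.items, PySem.Set.diff (PySem.Set.ofList books) st.2, st.2)

-- ===== PORT B =====
-- literal port of Source B: the placements list comprehension, the per-book dict
-- comprehension filtering it, and the set comprehension over its first components
def books_in_stores_alt (books : List String) (stores : List (List String)) :
    (List (String × List Int)) × List String × List String :=
  let placements := (PySem.List.enumerate stores).flatMap
    (fun p => p.2.map (fun book => (book, p.1)))
  let in_which_stores := books.foldl
    (fun d b => d.insert b ((placements.filter (fun q => q.1 == b)).map (fun q => q.2)))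
    PySem.Dict.empty
  let all_books := PySem.Set.ofList (placements.map (fun q => q.1))
  let not_in_any_store := PySem.Set.diff (PySem.Set.ofList books) all_books
  (in_which_stores.items, not_in_any_store, all_books)

-- ===== PRECONDITION & SPEC =====
def Spec_books_in_stores (books : List String) (stores : List (List String)) (out : (List (String × List Int)) × List String × List String) : Prop := out = books_in_stores_alt books stores
instance (books : List String) (stores : List (List String)) (out : (List (String × List Int)) × List String × List String) : Decidable (Spec_books_in_stores books stores out) := by unfold Spec_books_in_stores; infer_instance

-- ===== CLAIM (what is proved, stated in full; the proofs are below) =====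
def Claim_equal_books_in_stores : Prop := ∀ (books : List String) (stores : List (List String)), Dom_books_in_stores books stores → Spec_books_in_stores books stores (books_in_stores books stores)

-- ===== LEMMAS AND PROOFS =====

-- a componentwise fold over a pair splits into two folds
theorem pv_foldl_prod {α β γ : Type} (f : α → γ → α) (g : β → γ → β)
    (l : List γ) (a : α) (b : β) :
    l.foldl (fun p x => (f p.1 x, g p.2 x)) (a, b) = (l.foldl f a, l.foldl g b) := by
  induction l generalizing a b with
  | nil => rfl
  | cons h t ih => simp [List.foldl_cons, ih]

-- A's nested pair fold splits into the dict fold and the set fold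
theorem pv_split (L : List (Int × List String))
    (d : PySem.Dict String (List Int)) (s : PySem.Set String) :
    L.foldl (fun (acc : PySem.Dict String (List Int) × PySem.Set String) p =>
        p.2.foldl (fun acc book =>
          (acc.1.modify book [] (fun l => l ++ [p.1]), PySem.Set.add acc.2 book)) acc) (d, s)
    = (L.foldl (fun d p => p.2.foldl (fun d book => d.modify book [] (fun l => l ++ [p.1])) d) d,
       L.foldl (fun s p => p.2.foldl PySem.Set.add s) s) := by
  induction L generalizing d s with
  | nil => rfl
  | cons h t ih =>
    simp only [List.foldl_cons]
    rw [pv_foldl_prod (fun d book => d.modify book [] (fun l => l ++ [h.1]))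
      (fun s book => PySem.Set.add s book) h.2 d s, ih]

-- the set accumulated over enumerate(stores) is the fold of Set.add over the flattened stores
theorem pv_set_fold (stores : List (List String)) (s0 : Int) (s : PySem.Set String) :
    (PySem.List.enumerate stores s0).foldl (fun s p => p.2.foldl PySem.Set.add s) s
    = (stores.flatMap id).foldl PySem.Set.add s := by
  induction stores generalizing s0 s with
  | nil => rfl
  | cons h t ih =>
    simp only [PySem.List.enumerate_cons, List.foldl_cons, List.flatMap_cons,
      List.foldl_append, id]
    exact ih _ _

-- A's nested dict fold equals the flat fold over the placements list
theorem pv_flat (stores : List (List String)) (s0 : Int)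
    (d : PySem.Dict String (List Int)) :
    (PySem.List.enumerate stores s0).foldl
        (fun d p => p.2.foldl (fun d book => d.modify book [] (fun l => l ++ [p.1])) d) d
    = ((PySem.List.enumerate stores s0).flatMap
        (fun p => p.2.map (fun book => (book, p.1)))).foldl
        (fun d q => d.modify q.1 [] (fun l => l ++ [q.2])) d := by
  induction stores generalizing s0 d with
  | nil => rfl
  | cons h t ih =>
    simp only [PySem.List.enumerate_cons, List.foldl_cons, List.flatMap_cons,
      List.foldl_append, List.foldl_map]
    exact ih _ _

-- the second components of the placements list are the flattened stores
theorem pv_placements_fst (stores : List (List String)) (s0 : Int) :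
    ((PySem.List.enumerate stores s0).flatMap
        (fun p => p.2.map (fun book => (book, p.1)))).map (fun q => q.1)
    = stores.flatMap id := by
  induction stores generalizing s0 with
  | nil => rfl
  | cons h t ih =>
    simp only [PySem.List.enumerate_cons, List.flatMap_cons, List.map_append,
      List.map_map, Function.comp_def, List.map_id', id_eq, List.flatMap_cons]
    rw [ih]

-- ===== VERDICT (by name: the statement is the Claim_ definition above) =====
theorem books_in_stores_spec : Claim_equal_books_in_stores := by
  intro books stores _
  unfold Spec_books_in_stores books_in_stores books_in_stores_alt
  rw [pv_split, pv_set_fold, pv_flat]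
  simp only [PySem.Dict.getD_foldl_modify_append, PySem.Dict.getD_empty,
    List.nil_append, pv_placements_fst, PySem.Set.ofList_eq_foldl, PySem.Set.empty]
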